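-- pv_equiv track=rewrite | github.com/franksotogithub/ArcPy | ComparacionParticiones.py | CompararConjuntos
-- ===== SOURCE A (Python) =====
-- def CompararConjuntos(lista1,lista2):
--     condicion_final=1
--     condicion=0
--     for elemento in lista1:
--
--         el=set(elemento)
--         condicion=0
--         for elemento2 in lista2:
--             el2=set(elemento2)
--             if el==el2:
--                 condicion=1
--                 break
--
--
--         condicion_final=condicion*condicion_final
--
--         #print condicion_final
--
--         if condicion_final==0:
--             return 0
--
--     return condicion_final
-- ===== SOURCE B (Python) =====
-- def CompararConjuntos(lista1, lista2):
--     s2 = {frozenset(e) for e in lista2}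
--     s1 = {frozenset(e) for e in lista1}
--     return 1 if s1 <= s2 else 0
-- ===== Notes on version B (the rewrite author's own statement) =====
-- stated objective: idiomatic
-- what changed: Replaces the nested per-element linear search (with break and a running product) by building two sets of frozensets and one subset test s1 <= s2.
import Mathlib
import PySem

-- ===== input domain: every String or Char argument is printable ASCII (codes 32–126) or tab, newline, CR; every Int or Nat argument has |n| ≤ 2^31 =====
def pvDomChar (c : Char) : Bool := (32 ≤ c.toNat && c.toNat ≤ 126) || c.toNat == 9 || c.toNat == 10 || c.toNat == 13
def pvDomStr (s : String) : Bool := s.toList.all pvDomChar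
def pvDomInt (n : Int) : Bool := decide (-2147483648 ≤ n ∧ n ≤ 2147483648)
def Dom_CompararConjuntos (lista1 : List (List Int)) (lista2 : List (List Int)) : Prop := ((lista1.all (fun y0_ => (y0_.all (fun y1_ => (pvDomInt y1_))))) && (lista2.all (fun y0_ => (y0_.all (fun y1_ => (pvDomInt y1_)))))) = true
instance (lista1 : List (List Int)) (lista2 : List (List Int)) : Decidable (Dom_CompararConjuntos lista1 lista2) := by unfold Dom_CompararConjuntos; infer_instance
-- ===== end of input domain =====

-- B replaces A's nested search loops (running product, early return) by two set
-- comprehensions over frozensets and a single subset test (idiomatic, same cost class).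

-- ===== PORT A =====
-- inner 'for elemento2 in lista2' loop with break: 1 if some set(elemento2) equals el
def pvInnerA (el : PySem.Set Int) (lista2 : List (List Int)) : Int :=
  match lista2 with
  | [] => 0
  | e2 :: rest =>
      if PySem.Set.equal el (PySem.Set.ofList e2) then 1 else pvInnerA el rest

-- outer loop over lista1 carrying condicion_final, with the early 'return 0'
def pvOuterA (lista1 : List (List Int)) (lista2 : List (List Int)) (cf : Int) : Int :=
  match lista1 with
  | [] => cf
  | e :: rest =>
      let condicion := pvInnerA (PySem.Set.ofList e) lista2
      let cf' := condicion * cf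
      if cf' = 0 then 0 else pvOuterA rest lista2 cf'

def CompararConjuntos (lista1 : List (List Int)) (lista2 : List (List Int)) : Int :=
  pvOuterA lista1 lista2 1

-- ===== PORT B =====
-- frozenset(e): a frozenset of Ints is represented by its canonical (sorted, deduplicated)
-- element list — exact for frozenset equality/hashing, which is all Source B uses it for.
def pvFrozen (e : List Int) : List Int :=
  PySem.List.sorted (PySem.Set.ofList e) (fun x => x) false

def CompararConjuntos_alt (lista1 : List (List Int)) (lista2 : List (List Int)) : Int :=
  let s2 : PySem.Set (List Int) := PySem.Set.ofList (lista2.map pvFrozen)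
  let s1 : PySem.Set (List Int) := PySem.Set.ofList (lista1.map pvFrozen)
  if PySem.Set.issubset s1 s2 then 1 else 0

-- ===== PRECONDITION & SPEC =====
def Spec_CompararConjuntos (lista1 : List (List Int)) (lista2 : List (List Int)) (out : Int) : Prop := out = CompararConjuntos_alt lista1 lista2
instance (lista1 : List (List Int)) (lista2 : List (List Int)) (out : Int) : Decidable (Spec_CompararConjuntos lista1 lista2 out) := by unfold Spec_CompararConjuntos; infer_instance

-- ===== CLAIM (what is proved, stated in full; the proofs are below) =====
def Claim_equal_CompararConjuntos : Prop := ∀ (lista1 : List (List Int)) (lista2 : List (List Int)), Dom_CompararConjuntos lista1 lista2 → Spec_CompararConjuntos lista1 lista2 (CompararConjuntos lista1 lista2)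

-- ===== LEMMAS AND PROOFS =====

-- two lists have the same canonical frozenset form iff their Python sets are equal
lemma pvFrozen_eq_iff (a b : List Int) :
    pvFrozen a = pvFrozen b ↔ PySem.Set.equal (PySem.Set.ofList a) (PySem.Set.ofList b) = true := by
  constructor
  · intro h
    rw [PySem.Set.equal_iff]
    intro x
    have ha := PySem.List.mem_sorted (x := x) (xs := PySem.Set.ofList a) (key := fun y => y) (rev := false)
    have hb := PySem.List.mem_sorted (x := x) (xs := PySem.Set.ofList b) (key := fun y => y) (rev := false)
    unfold pvFrozen at h
    rw [← ha, ← hb, h]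
  · intro h
    have hmem := (PySem.Set.equal_iff _ _).1 h
    have hperm : (PySem.Set.ofList a).Perm (PySem.Set.ofList b) := by
      rw [List.perm_ext_iff_of_nodup (PySem.Set.nodup_ofList _) (PySem.Set.nodup_ofList _)]
      exact hmem
    unfold pvFrozen
    apply PySem.List.sorted_eq_of_perm_of_pairwise_lt
    · exact (PySem.List.sorted_perm (xs := PySem.Set.ofList b) (key := fun y => y) (rev := false)).trans hperm.symm
    · exact PySem.List.sorted_ofList_pairwise_lt b

lemma pvInnerA_eq (el : List Int) (l2 : List (List Int)) :
    pvInnerA (PySem.Set.ofList el) l2 =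
      if ∃ e2 ∈ l2, pvFrozen el = pvFrozen e2 then 1 else 0 := by
  induction l2 with
  | nil => simp [pvInnerA]
  | cons e2 rest ih =>
    simp only [pvInnerA, ih]
    by_cases h : PySem.Set.equal (PySem.Set.ofList el) (PySem.Set.ofList e2) = true
    · rw [if_pos h, if_pos ⟨e2, by simp, (pvFrozen_eq_iff el e2).2 h⟩]
    · rw [if_neg (by simpa using h)]
      by_cases h2 : ∃ x ∈ rest, pvFrozen el = pvFrozen x
      · rw [if_pos h2, if_pos]
        obtain ⟨x, hx, hfx⟩ := h2
        exact ⟨x, List.mem_cons_of_mem _ hx, hfx⟩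
      · rw [if_neg h2, if_neg]
        rintro ⟨x, hx, hfx⟩
        rcases List.mem_cons.1 hx with rfl | hx
        · exact h ((pvFrozen_eq_iff el x).1 hfx)
        · exact h2 ⟨x, hx, hfx⟩

lemma pvOuterA_eq (l1 l2 : List (List Int)) :
    pvOuterA l1 l2 1 =
      if ∀ e ∈ l1, ∃ e2 ∈ l2, pvFrozen e = pvFrozen e2 then 1 else 0 := by
  induction l1 with
  | nil => simp [pvOuterA]
  | cons e rest ih =>
    simp only [pvOuterA, pvInnerA_eq]
    by_cases h : ∃ e2 ∈ l2, pvFrozen e = pvFrozen e2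
    · rw [if_pos h]
      simp only [one_mul, if_neg (by norm_num : (1:Int) ≠ 0), ih]
      by_cases h2 : ∀ x ∈ rest, ∃ e2 ∈ l2, pvFrozen x = pvFrozen e2
      · rw [if_pos h2, if_pos]
        intro x hx
        rcases List.mem_cons.1 hx with rfl | hx
        · exact h
        · exact h2 x hx
      · rw [if_neg h2, if_neg]
        intro hall
        exact h2 fun x hx => hall x (List.mem_cons_of_mem _ hx)
    · rw [if_neg h, if_pos (by norm_num : (0:Int) * 1 = 0),
        if_neg (fun hall => h (hall e List.mem_cons_self))]

-- ===== VERDICT (by name: the statement is the Claim_ definition above) =====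
theorem CompararConjuntos_spec : Claim_equal_CompararConjuntos := by
  intro l1 l2 _
  unfold Spec_CompararConjuntos CompararConjuntos CompararConjuntos_alt
  rw [pvOuterA_eq]
  by_cases h : PySem.Set.issubset (PySem.Set.ofList (l1.map pvFrozen)) (PySem.Set.ofList (l2.map pvFrozen)) = true
  · simp only [h, if_true]
    rw [if_pos]
    intro e he
    have := (PySem.Set.issubset_iff _ _).1 h (pvFrozen e)
      ((PySem.Set.mem_ofList _ _).2 (List.mem_map_of_mem he))
    obtain ⟨e2, he2, hf⟩ := List.mem_map.1 ((PySem.Set.mem_ofList _ _).1 this)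
    exact ⟨e2, he2, hf.symm⟩
  · have hA : ¬ ∀ e ∈ l1, ∃ e2 ∈ l2, pvFrozen e = pvFrozen e2 := by
      intro hall
      apply h
      rw [PySem.Set.issubset_iff]
      intro k hk
      obtain ⟨e, he, rfl⟩ := List.mem_map.1 ((PySem.Set.mem_ofList _ _).1 hk)
      obtain ⟨e2, he2, hf⟩ := hall e he
      exact (PySem.Set.mem_ofList _ _).2 (hf ▸ List.mem_map_of_mem he2)
    rw [if_neg hA]
    simp [h]
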